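-- pv_equiv track=rewrite | github.com/cheroto/swagger-agent | mascot.py | apply_overlays
-- ===== SOURCE A (Python) =====
-- OVERLAYS = {
--     "bronze_helm": {
--         1: r"       {Y}/{B}   {G}.__.{B}   {Y}\{B}   ",
--     },
--     "bronze_armor": {
--         7: r"    |_|   {G}[======]{B}   |_|",
--         8: r"      |___{G}[======]{B}___|  ",
--     },
--     "steel_helm": {
--         1: r"       {Y}/{B}   {M}/TTTT\{B}   {Y}\{B}   ",
--     },
--     "steel_armor": {
--         7: r"    |_|   {M}[XXXXXX]{B}   |_|",
--         8: r"      |___{M}[XXXXXX]{B}___|  ",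
--     },
--     "sword_right": {
--         # Appends the sword to the right side, while retaining the Steel Armor in the middle
--         4: r"      |   {W}'------'{B}   |     {M}/{B}",
--         5: r"      |  {R}.--------.{B}  |    {M}/|{B}",
--         6: r"     /|  {R}\________/{B}  |\  {M}/ |{B}",
--         7: r"    |_|   {M}[XXXXXX]{B}   |_| {M}|  |{B}",
--         8: r"      |___{M}[XXXXXX]{B}___|   {M}|  |{B}",
--         9: r"        | |      | |     {M}|/ {B}",
--        10: r"        |_|      |_|     {M}V  {B}",
--     }
-- }
--
-- def apply_overlays(base_frame_str, overlay_keys):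
--     base_lines = base_frame_str.strip('\n').split('\n')
--     for overlay_key in overlay_keys:
--         if overlay_key in OVERLAYS:
--             for line_idx, overlay_content in OVERLAYS[overlay_key].items():
--                 if 0 <= line_idx < len(base_lines):
--                     base_lines[line_idx] = overlay_content
--     return '\n'.join(base_lines)
-- ===== SOURCE B (Python) =====
-- OVERLAYS = {
--     "bronze_helm": {
--         1: r"       {Y}/{B}   {G}.__.{B}   {Y}\{B}   ",
--     },
--     "bronze_armor": {
--         7: r"    |_|   {G}[======]{B}   |_|",
--         8: r"      |___{G}[======]{B}___|  ",
--     },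
--     "steel_helm": {
--         1: r"       {Y}/{B}   {M}/TTTT\{B}   {Y}\{B}   ",
--     },
--     "steel_armor": {
--         7: r"    |_|   {M}[XXXXXX]{B}   |_|",
--         8: r"      |___{M}[XXXXXX]{B}___|  ",
--     },
--     "sword_right": {
--         4: r"      |   {W}'------'{B}   |     {M}/{B}",
--         5: r"      |  {R}.--------.{B}  |    {M}/|{B}",
--         6: r"     /|  {R}\________/{B}  |\  {M}/ |{B}",
--         7: r"    |_|   {M}[XXXXXX]{B}   |_| {M}|  |{B}",
--         8: r"      |___{M}[XXXXXX]{B}___|   {M}|  |{B}",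
--         9: r"        | |      | |     {M}|/ {B}",
--        10: r"        |_|      |_|     {M}V  {B}",
--     }
-- }
--
-- def apply_overlays(base_frame_str, overlay_keys):
--     # Merge all requested overlays into one table (later keys overwrite earlier),
--     # then emit each line in a single lookup-driven pass.
--     table = {}
--     for key in overlay_keys:
--         if key in OVERLAYS:
--             table.update(OVERLAYS[key])
--     return '\n'.join(table.get(i, line)
--                      for i, line in enumerate(base_frame_str.strip('\n').split('\n')))
-- ===== Notes on version B (the rewrite author's own statement) =====
-- stated objective: simpler
-- what changed: Replaces the nested in-place mutation of the line list with a single merged index->content table built first, then one enumerate pass that emits either the override or the original line.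
import Mathlib
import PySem

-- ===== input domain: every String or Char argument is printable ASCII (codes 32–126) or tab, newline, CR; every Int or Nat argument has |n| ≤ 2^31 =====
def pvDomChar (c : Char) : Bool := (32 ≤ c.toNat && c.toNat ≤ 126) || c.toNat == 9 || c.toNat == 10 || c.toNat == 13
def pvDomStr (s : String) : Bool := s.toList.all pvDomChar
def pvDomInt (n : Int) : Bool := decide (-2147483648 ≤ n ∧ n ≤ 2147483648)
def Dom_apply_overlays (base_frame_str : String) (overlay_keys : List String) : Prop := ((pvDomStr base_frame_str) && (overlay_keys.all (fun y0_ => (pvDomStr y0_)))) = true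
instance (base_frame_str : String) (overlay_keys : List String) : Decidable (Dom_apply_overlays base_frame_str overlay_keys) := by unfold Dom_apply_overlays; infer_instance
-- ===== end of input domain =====

-- B replaces A's nested in-place line mutation with a merged index->content table
-- built once, then a single enumerate pass (objective: simpler decomposition).

-- ===== PORT A =====
-- shared constant: the module-level OVERLAYS dict (string key -> {int index: content})
def OVERLAYS : List (String × List (Int × String)) :=
  [ ("bronze_helm", [(1, "       {Y}/{B}   {G}.__.{B}   {Y}\\{B}   ")]),
    ("bronze_armor", [(7, "    |_|   {G}[======]{B}   |_|"),
                      (8, "      |___{G}[======]{B}___|  ")]),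
    ("steel_helm", [(1, "       {Y}/{B}   {M}/TTTT\\{B}   {Y}\\{B}   ")]),
    ("steel_armor", [(7, "    |_|   {M}[XXXXXX]{B}   |_|"),
                     (8, "      |___{M}[XXXXXX]{B}___|  ")]),
    ("sword_right", [(4, "      |   {W}'------'{B}   |     {M}/{B}"),
                     (5, "      |  {R}.--------.{B}  |    {M}/|{B}"),
                     (6, "     /|  {R}\\________/{B}  |\\  {M}/ |{B}"),
                     (7, "    |_|   {M}[XXXXXX]{B}   |_| {M}|  |{B}"),
                     (8, "      |___{M}[XXXXXX]{B}___|   {M}|  |{B}"),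
                     (9, "        | |      | |     {M}|/ {B}"),
                     (10, "        |_|      |_|     {M}V  {B}")]) ]

-- base_lines[line_idx] = overlay_content, guarded by 0 <= line_idx < len(base_lines)
def pvApplyLine (ls : List String) (p : Int × String) : List String :=
  if 0 ≤ p.1 ∧ p.1 < (ls.length : Int) then ls.set p.1.toNat p.2 else ls

-- one iteration of the outer loop: 'if overlay_key in OVERLAYS: for … items(): …'
def pvApplyKey (ls : List String) (k : String) : List String :=
  match OVERLAYS.lookup k with
  | some items => items.foldl pvApplyLine ls
  | none => ls

-- .split('\n') via split? (some since the separator is nonempty; getD is never the none case)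
def apply_overlays (base_frame_str : String) (overlay_keys : List String) : String :=
  PySem.Str.join "\n" (overlay_keys.foldl pvApplyKey
    ((PySem.Str.split? (PySem.Str.stripChars base_frame_str "\n") "\n").getD []))

-- ===== PORT B =====
-- one iteration of B's merge loop: 'if key in OVERLAYS: table.update(OVERLAYS[key])'
def pvMergeKey (d : PySem.Dict Int String) (k : String) : PySem.Dict Int String :=
  match OVERLAYS.lookup k with
  | some items => items.foldl (fun d p => d.insert p.1 p.2) d
  | none => d

def apply_overlays_alt (base_frame_str : String) (overlay_keys : List String) : String :=
  PySem.Str.join "\n"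
    ((PySem.List.enumerate ((PySem.Str.split? (PySem.Str.stripChars base_frame_str "\n") "\n").getD [])).map
      (fun p => (overlay_keys.foldl pvMergeKey PySem.Dict.empty).getD p.1 p.2))

-- ===== PRECONDITION & SPEC =====
def Spec_apply_overlays (base_frame_str : String) (overlay_keys : List String) (out : String) : Prop := out = apply_overlays_alt base_frame_str overlay_keys
instance (base_frame_str : String) (overlay_keys : List String) (out : String) : Decidable (Spec_apply_overlays base_frame_str overlay_keys out) := by unfold Spec_apply_overlays; infer_instance

-- ===== CLAIM (what is proved, stated in full; the proofs are below) =====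
def Claim_equal_apply_overlays : Prop := ∀ (base_frame_str : String) (overlay_keys : List String), Dom_apply_overlays base_frame_str overlay_keys → Spec_apply_overlays base_frame_str overlay_keys (apply_overlays base_frame_str overlay_keys)

-- ===== LEMMAS AND PROOFS =====

-- the shape B produces: each line replaced by its table entry (if any)
def pvApply (d : PySem.Dict Int String) (ls : List String) : List String :=
  (PySem.List.enumerate ls).map (fun p => d.getD p.1 p.2)

theorem pvApply_empty (ls : List String) : pvApply PySem.Dict.empty ls = ls := by
  simp [pvApply, PySem.Dict.getD_empty, PySem.List.map_snd_enumerate]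

theorem pvApply_length (d : PySem.Dict Int String) (ls : List String) :
    (pvApply d ls).length = ls.length := by
  simp [pvApply, PySem.List.length_enumerate]

theorem pvApplyLine_pvApply (d : PySem.Dict Int String) (ls : List String) (p : Int × String) :
    pvApplyLine (pvApply d ls) p = pvApply (d.insert p.1 p.2) ls := by
  obtain ⟨i, c⟩ := p
  by_cases h : 0 ≤ i ∧ i < (ls.length : Int)
  · have hlen : (pvApply d ls).length = ls.length := pvApply_length d ls
    simp only [pvApplyLine, hlen, h, and_self, if_pos]
    apply List.ext_getElem
    · simp [pvApply, PySem.List.length_enumerate]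
    · intro j h1 h2
      have hjlen : j < ls.length := by
        simpa [pvApply, PySem.List.length_enumerate] using h2
      have hget : ∀ (e : PySem.Dict Int String), (pvApply e ls)[j]'(by
          simpa [pvApply, PySem.List.length_enumerate] using hjlen) =
          e.getD (j : Int) (ls[j]'hjlen) := by
        intro e
        simp [pvApply, PySem.List.getElem_enumerate]
      rw [List.getElem_set, hget (d.insert i c), PySem.Dict.getD_insert]
      by_cases hj : i.toNat = j
      · have hji : (j : Int) = i := by omega
        simp [hj, hji]
      · have hji : ¬ ((j : Int) = i) := by omega
        simp [hj, hji, hget d]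
  · have hlen : (pvApply d ls).length = ls.length := pvApply_length d ls
    simp only [pvApplyLine, hlen, h, if_neg, not_false_iff]
    unfold pvApply
    apply List.map_congr_left
    intro q hq
    rcases (PySem.List.mem_enumerate_iff _ _ _).1 hq with ⟨k, hk, rfl⟩
    have hne : (k : Int) ≠ i := by
      rcases lt_or_ge i 0 with hi | hi
      · omega
      · have : ¬ i < (ls.length : Int) := fun hlt => h ⟨hi, hlt⟩
        omega
    simp [PySem.Dict.getD_insert, hne]

theorem foldl_pvApplyLine (items : List (Int × String)) (d : PySem.Dict Int String)
    (ls : List String) :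
    items.foldl pvApplyLine (pvApply d ls) =
      pvApply (items.foldl (fun d p => d.insert p.1 p.2) d) ls := by
  induction items generalizing d with
  | nil => rfl
  | cons p rest ih => simp [List.foldl_cons, pvApplyLine_pvApply, ih]

theorem pvApplyKey_pvApply (d : PySem.Dict Int String) (ls : List String) (k : String) :
    pvApplyKey (pvApply d ls) k = pvApply (pvMergeKey d k) ls := by
  unfold pvApplyKey pvMergeKey
  cases OVERLAYS.lookup k with
  | none => rfl
  | some items => exact foldl_pvApplyLine items d ls

theorem foldl_pvApplyKey (keys : List String) (d : PySem.Dict Int String) (ls : List String) :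
    keys.foldl pvApplyKey (pvApply d ls) = pvApply (keys.foldl pvMergeKey d) ls := by
  induction keys generalizing d with
  | nil => rfl
  | cons k rest ih => simp [List.foldl_cons, pvApplyKey_pvApply, ih]

-- ===== VERDICT (by name: the statement is the Claim_ definition above) =====
theorem apply_overlays_spec : Claim_equal_apply_overlays := by
  intro base_frame_str overlay_keys _
  unfold Spec_apply_overlays apply_overlays apply_overlays_alt
  have h := foldl_pvApplyKey overlay_keys PySem.Dict.empty
    ((PySem.Str.split? (PySem.Str.stripChars base_frame_str "\n") "\n").getD [])
  rw [pvApply_empty] at h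
  rw [h]
  rfl
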